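-- pv_equiv track=rewrite | github.com/ph1223/Dram_controller | ramulator2/01_trace_to_vcd.py | generate_vcd
-- ===== SOURCE A (Python) =====
-- PREAMBLE_CYCLES = 897  # Number of idle cycles before actual trace starts
--
-- state_map = {
--     'NOP':   '01001',  # FSM_IDLE       = 9
--     'ACT':   '01011',  # FSM_ACTIVE     = 11
--     'WR':    '01111',  # FSM_WRITE      = 15
--     'PRE':   '10001',  # FSM_PRE        = 17
--     'RD':    '10000',  # FSM_READ       = 16
--     'REFab': '01101',  # FSM_REFRESH    = 13
--     'PREA':  '10001',  # Alias for PRE   = 17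
-- }
--
-- def generate_vcd(trace, max_cycle):
--     vcd = []
--     vcd.append("$date today $end")
--     vcd.append("$version trace_to_vcd.py with precise 1ns clock $end")
--     vcd.append("$timescale 0.5ns $end")  # Every timestamp unit is 0.5ns
--     vcd.append("$scope module dram $end")
--     vcd.append("$var wire 1 ! clock $end")
--     vcd.append("$var wire 5 # state $end")
--     vcd.append("$upscope $end")
--     vcd.append("$enddefinitions $end")
--     vcd.append("$dumpvars")
--     vcd.append("0!")          # initial clock value
--     vcd.append("b0000 #")     # initial state
--     vcd.append("$end")
--
--     last_state = 'NOP'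
--     current_state = 'NOP'
--     delayed_trace = {
--         ts + PREAMBLE_CYCLES + 1: cmd for ts, cmd in trace.items()
--     }
--
--     total_cycles = max_cycle + PREAMBLE_CYCLES + 10  # Extra buffer
--     timestamp = 0  # 0.5ns steps
--
--     for cycle in range(total_cycles):
--         # Rising edge (clock = 1)
--         vcd.append(f"#{timestamp}")
--         vcd.append("1!")
--
--         if cycle == PREAMBLE_CYCLES:
--             vcd.append("$comment Begin actual trace $end")
--
--         new_state = delayed_trace.get(cycle, 'NOP')
--         if new_state != current_state:
--             state_bits = state_map.get(new_state, '0000')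
--             vcd.append(f"b{state_bits} #")
--             current_state = new_state
--
--         timestamp += 1  # next step = 0.5ns
--
--         # Falling edge (clock = 0)
--         vcd.append(f"#{timestamp}")
--         vcd.append("0!")
--
--         timestamp += 1  # next step = 0.5ns
--
--     return "\n".join(vcd)
-- ===== SOURCE B (Python) =====
-- PREAMBLE_CYCLES = 897
--
-- state_map = {
--     'NOP':   '01001',
--     'ACT':   '01011',
--     'WR':    '01111',
--     'PRE':   '10001',
--     'RD':    '10000',
--     'REFab': '01101',
--     'PREA':  '10001',
-- }
--
-- def generate_vcd(trace, max_cycle):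
--     header = [
--         "$date today $end",
--         "$version trace_to_vcd.py with precise 1ns clock $end",
--         "$timescale 0.5ns $end",
--         "$scope module dram $end",
--         "$var wire 1 ! clock $end",
--         "$var wire 5 # state $end",
--         "$upscope $end",
--         "$enddefinitions $end",
--         "$dumpvars",
--         "0!",
--         "b0000 #",
--         "$end",
--     ]
--     delayed = {ts + PREAMBLE_CYCLES + 1: cmd for ts, cmd in trace.items()}
--     total_cycles = max_cycle + PREAMBLE_CYCLES + 10
--
--     # Materialize the state sequence, then adjacent-diff it into an
--     # optional "bits to emit" per cycle (None = no transition).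
--     states = [delayed.get(c, 'NOP') for c in range(total_cycles)]
--     trans = [state_map.get(s, '0000') if s != p else None
--              for p, s in zip(['NOP'] + states, states)]
--
--     body = []
--     t = 0
--     for c, bits in enumerate(trans):
--         body.append(f"#{t}")
--         body.append("1!")
--         if c == PREAMBLE_CYCLES:
--             body.append("$comment Begin actual trace $end")
--         if bits is not None:
--             body.append(f"b{bits} #")
--         body.append(f"#{t + 1}")
--         body.append("0!")
--         t += 2
--     return "\n".join(header + body)
-- ===== Notes on version B (the rewrite author's own statement) =====
-- stated objective: alternative
-- what changed: B replaces A's state-threading loop (current_state carried through the emission loop) by a data-flow pipeline: it materializes the per-cycle state sequence, adjacent-diffs it (zip with itself shifted, seeded with 'NOP') into an optional transition-bits value per cycle, and then a separate formatting pass emits the lines.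
import Mathlib
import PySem

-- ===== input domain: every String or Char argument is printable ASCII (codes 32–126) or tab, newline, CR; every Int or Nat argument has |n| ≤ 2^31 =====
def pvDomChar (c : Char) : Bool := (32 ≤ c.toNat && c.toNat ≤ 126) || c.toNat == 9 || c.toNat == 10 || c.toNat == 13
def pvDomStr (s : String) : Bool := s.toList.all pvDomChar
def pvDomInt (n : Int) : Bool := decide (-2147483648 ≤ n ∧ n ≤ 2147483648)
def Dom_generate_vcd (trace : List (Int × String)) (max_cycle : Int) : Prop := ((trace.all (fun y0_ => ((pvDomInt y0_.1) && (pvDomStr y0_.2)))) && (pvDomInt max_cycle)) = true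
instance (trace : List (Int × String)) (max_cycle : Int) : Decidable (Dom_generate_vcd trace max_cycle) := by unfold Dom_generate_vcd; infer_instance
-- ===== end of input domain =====

-- B rewrites A's single state-threading loop as a pipeline (state sequence, adjacent diff,
-- then a formatting pass); same output, no speed claim.

-- shared module constants (both Python versions use the identical literals)
def vcdStateMap : PySem.Dict String String :=
  PySem.Dict.ofList [("NOP", "01001"), ("ACT", "01011"), ("WR", "01111"),
    ("PRE", "10001"), ("RD", "10000"), ("REFab", "01101"), ("PREA", "10001")]

def vcdHeader : List String :=
  ["$date today $end",
   "$version trace_to_vcd.py with precise 1ns clock $end",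
   "$timescale 0.5ns $end",
   "$scope module dram $end",
   "$var wire 1 ! clock $end",
   "$var wire 5 # state $end",
   "$upscope $end",
   "$enddefinitions $end",
   "$dumpvars",
   "0!",
   "b0000 #",
   "$end"]

-- {ts + PREAMBLE_CYCLES + 1: cmd for ts, cmd in trace.items()} (identical in A and B)
def vcdDelayed (trace : List (Int × String)) : PySem.Dict Int String :=
  trace.foldl (fun d p => d.insert (p.1 + 897 + 1) p.2) PySem.Dict.empty

-- ===== PORT A =====
-- one iteration of A's loop body (state: (vcd, current_state, timestamp))
def vcdStepA (delayed : PySem.Dict Int String)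
    (st : List String × String × Int) (cycle : Int) : List String × String × Int :=
  let vcd := st.1
  let current := st.2.1
  let t := st.2.2
  let vcd := vcd ++ ["#" ++ PySem.Int.toStr t, "1!"]
  let vcd := if cycle = 897 then vcd ++ ["$comment Begin actual trace $end"] else vcd
  let new_state := delayed.getD cycle "NOP"
  let vcd :=
    if new_state ≠ current then
      vcd ++ ["b" ++ vcdStateMap.getD new_state "0000" ++ " #"]
    else vcd
  let current := if new_state ≠ current then new_state else current
  let t := t + 1
  let vcd := vcd ++ ["#" ++ PySem.Int.toStr t, "0!"]
  (vcd, current, t + 1)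

def generate_vcd (trace : List (Int × String)) (max_cycle : Int) : String :=
  let delayed := vcdDelayed trace
  let total_cycles := max_cycle + 897 + 10
  let st := (PySem.List.pyRange 0 total_cycles 1).foldl (vcdStepA delayed)
      (vcdHeader, "NOP", 0)
  PySem.Str.join "\n" st.1

-- ===== PORT B =====
-- one iteration of B's formatting pass (state: (body, t)); input: (cycle index, optional bits)
def vcdStepB (st : List String × Int) (cb : Int × Option String) : List String × Int :=
  let body := st.1
  let t := st.2
  let body := body ++ ["#" ++ PySem.Int.toStr t, "1!"]
  let body := if cb.1 = 897 then body ++ ["$comment Begin actual trace $end"] else body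
  let body :=
    match cb.2 with
    | some bits => body ++ ["b" ++ bits ++ " #"]
    | none => body
  (body ++ ["#" ++ PySem.Int.toStr (t + 1), "0!"], t + 2)

def generate_vcd_alt (trace : List (Int × String)) (max_cycle : Int) : String :=
  let delayed := vcdDelayed trace
  let total_cycles := max_cycle + 897 + 10
  let states := (PySem.List.pyRange 0 total_cycles 1).map (fun c => delayed.getD c "NOP")
  let trans := (List.zip ("NOP" :: states) states).map
      (fun ps => if ps.2 ≠ ps.1 then some (vcdStateMap.getD ps.2 "0000") else none)
  let st := (PySem.List.enumerate trans 0).foldl vcdStepB ([], 0)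
  PySem.Str.join "\n" (vcdHeader ++ st.1)

-- ===== PRECONDITION & SPEC =====
def Spec_generate_vcd (trace : List (Int × String)) (max_cycle : Int) (out : String) : Prop := out = generate_vcd_alt trace max_cycle
instance (trace : List (Int × String)) (max_cycle : Int) (out : String) : Decidable (Spec_generate_vcd trace max_cycle out) := by unfold Spec_generate_vcd; infer_instance

-- ===== CLAIM (what is proved, stated in full; the proofs are below) =====
def Claim_equal_generate_vcd : Prop := ∀ (trace : List (Int × String)) (max_cycle : Int), Dom_generate_vcd trace max_cycle → Spec_generate_vcd trace max_cycle (generate_vcd trace max_cycle)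

-- ===== LEMMAS AND PROOFS =====

-- the state A's loop carries just before processing cycle k ("NOP" at k = 0, else state of cycle k-1)
def pstate (d : PySem.Dict Int String) : Nat → String
  | 0 => "NOP"
  | k + 1 => d.getD (k : Int) "NOP"

-- the lines both loops emit for cycles k, k+1, …, k+n-1 starting at timestamp t
def vcdBlock (d : PySem.Dict Int String) : Nat → Nat → Int → List String
  | _, 0, _ => []
  | k, n + 1, t =>
      (["#" ++ PySem.Int.toStr t, "1!"]
        ++ (if (k : Int) = 897 then ["$comment Begin actual trace $end"] else [])
        ++ (if d.getD (k : Int) "NOP" ≠ pstate d k then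
              ["b" ++ vcdStateMap.getD (d.getD (k : Int) "NOP") "0000" ++ " #"]
            else [])
        ++ ["#" ++ PySem.Int.toStr (t + 1), "0!"])
      ++ vcdBlock d (k + 1) n (t + 2)

-- the state sequence for cycles k, …, k+n-1
def statesSeg (d : PySem.Dict Int String) (k n : Nat) : List String :=
  (List.range n).map (fun i => d.getD ((k + i : Nat) : Int) "NOP")

-- the per-cycle optional transition of B for cycle j
def tfun (d : PySem.Dict Int String) (j : Nat) : Option String :=
  if d.getD (j : Int) "NOP" ≠ pstate d j then
    some (vcdStateMap.getD (d.getD (j : Int) "NOP") "0000")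
  else none

lemma statesSeg_succ (d : PySem.Dict Int String) (k n : Nat) :
    statesSeg d k (n + 1) = d.getD (k : Int) "NOP" :: statesSeg d (k + 1) n := by
  simp only [statesSeg, List.range_succ_eq_map, List.map_cons, List.map_map,
    Function.comp_def, Nat.add_zero]
  refine List.cons_eq_cons.mpr ⟨rfl, ?_⟩
  apply List.map_congr_left
  intro i _
  have h : k + (i + 1) = (k + 1) + i := by omega
  rw [h]

lemma loopA (d : PySem.Dict Int String) :
    ∀ (n k : Nat) (acc : List String) (t : Int),
      ((List.range n).map (fun i => ((k + i : Nat) : Int))).foldl (vcdStepA d)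
          (acc, pstate d k, t)
        = (acc ++ vcdBlock d k n t, pstate d (k + n), t + 2 * n) := by
  intro n
  induction n with
  | zero => intro k acc t; simp [vcdBlock]
  | succ n ih =>
    intro k acc t
    rw [List.range_succ_eq_map]
    simp only [List.map_cons, List.map_map, List.foldl_cons, Function.comp_def]
    have hmap : (List.range n).map (fun i => ((k + (i + 1) : Nat) : Int))
        = (List.range n).map (fun i => (((k + 1) + i : Nat) : Int)) := by
      apply List.map_congr_left; intro i _
      have h : k + (i + 1) = (k + 1) + i := by omega
      rw [h]
    have hstep : vcdStepA d (acc, pstate d k, t) ((k + 0 : Nat) : Int)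
        = (acc ++ (["#" ++ PySem.Int.toStr t, "1!"]
            ++ (if (k : Int) = 897 then ["$comment Begin actual trace $end"] else [])
            ++ (if d.getD (k : Int) "NOP" ≠ pstate d k then
                  ["b" ++ vcdStateMap.getD (d.getD (k : Int) "NOP") "0000" ++ " #"]
                else [])
            ++ ["#" ++ PySem.Int.toStr (t + 1), "0!"]),
           pstate d (k + 1), t + 2) := by
      show vcdStepA d (acc, pstate d k, t) ((k : Nat) : Int) = _
      have hp : pstate d (k + 1) = d.getD (k : Int) "NOP" := rfl
      rw [hp]
      by_cases hs : d.getD (k : Int) "NOP" = pstate d k <;>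
        simp only [vcdStepA, ne_eq, hs, if_true, if_false,
          not_true_eq_false, not_false_eq_true] <;>
        by_cases hc : (k : Int) = 897 <;>
        simp [hc, List.append_assoc] <;> omega
    rw [hmap, hstep, ih (k + 1)]
    simp only [Prod.mk.injEq]
    refine ⟨?_, ?_, ?_⟩
    · simp [vcdBlock, List.append_assoc]
    · congr 1; omega
    · push_cast; ring

lemma transSeg_eq (d : PySem.Dict Int String) :
    ∀ (n k : Nat),
      (List.zip (pstate d k :: statesSeg d k n) (statesSeg d k n)).map
          (fun ps => if ps.2 ≠ ps.1 then some (vcdStateMap.getD ps.2 "0000") else none)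
        = (List.range n).map (fun i => tfun d (k + i)) := by
  intro n
  induction n with
  | zero => intro k; simp [statesSeg]
  | succ n ih =>
    intro k
    rw [statesSeg_succ, List.range_succ_eq_map]
    simp only [List.zip_cons_cons, List.map_cons, List.map_map, Function.comp_def,
      Nat.add_zero]
    refine List.cons_eq_cons.mpr ⟨?_, ?_⟩
    · simp [tfun]
    · have h1 : pstate d (k + 1) = d.getD (k : Int) "NOP" := rfl
      rw [← h1, ih (k + 1)]
      apply List.map_congr_left
      intro i _
      have h : (k + 1) + i = k + (i + 1) := by omega
      rw [h]

lemma loopB (d : PySem.Dict Int String) :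
    ∀ (n k : Nat) (acc : List String) (t : Int),
      (PySem.List.enumerate ((List.range n).map (fun i => tfun d (k + i))) (k : Int)).foldl
          vcdStepB (acc, t)
        = (acc ++ vcdBlock d k n t, t + 2 * n) := by
  intro n
  induction n with
  | zero => intro k acc t; simp [PySem.List.enumerate_nil, vcdBlock]
  | succ n ih =>
    intro k acc t
    rw [List.range_succ_eq_map]
    simp only [List.map_cons, List.map_map, Function.comp_def, Nat.add_zero,
      PySem.List.enumerate_cons, List.foldl_cons]
    have hmap : (List.range n).map (fun i => tfun d (k + (i + 1)))
        = (List.range n).map (fun i => tfun d ((k + 1) + i)) := by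
      apply List.map_congr_left; intro i _
      have h : k + (i + 1) = (k + 1) + i := by omega
      rw [h]
    have hstep : vcdStepB (acc, t) ((k : Int), tfun d k)
        = (acc ++ (["#" ++ PySem.Int.toStr t, "1!"]
            ++ (if (k : Int) = 897 then ["$comment Begin actual trace $end"] else [])
            ++ (if d.getD (k : Int) "NOP" ≠ pstate d k then
                  ["b" ++ vcdStateMap.getD (d.getD (k : Int) "NOP") "0000" ++ " #"]
                else [])
            ++ ["#" ++ PySem.Int.toStr (t + 1), "0!"]), t + 2) := by
      by_cases hs : d.getD (k : Int) "NOP" = pstate d k <;>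
        simp only [vcdStepB, tfun, ne_eq, hs, if_true, if_false,
          not_true_eq_false, not_false_eq_true] <;>
        by_cases hc : (k : Int) = 897 <;>
        simp [hc, List.append_assoc]
    have hk1 : (k : Int) + 1 = ((k + 1 : Nat) : Int) := by push_cast; ring
    rw [hmap, hstep, hk1, ih (k + 1)]
    simp only [Prod.mk.injEq]
    refine ⟨?_, ?_⟩
    · simp [vcdBlock, List.append_assoc]
    · push_cast; ring

-- ===== VERDICT (by name: the statement is the Claim_ definition above) =====
theorem generate_vcd_spec : Claim_equal_generate_vcd := by
  intro trace max_cycle _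
  unfold Spec_generate_vcd generate_vcd generate_vcd_alt
  dsimp only
  set d := vcdDelayed trace with hd
  set T := max_cycle + 897 + 10 with hT
  have hrange : PySem.List.pyRange 0 T 1
      = (List.range (T - 0).toNat).map (fun i => ((0 + i : Nat) : Int)) := by
    rw [PySem.List.pyRange_one]
    apply List.map_congr_left
    intro i _
    push_cast
    ring
  set n := (T - 0).toNat with hn
  rw [hrange]
  have hA := loopA d n 0 vcdHeader 0
  have hstates : ((List.range n).map (fun i => ((0 + i : Nat) : Int))).map
      (fun c => d.getD c "NOP") = statesSeg d 0 n := by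
    simp [statesSeg, List.map_map, Function.comp_def]
  have hp0 : pstate d 0 = "NOP" := rfl
  rw [hp0] at hA
  rw [hA]
  have htr := transSeg_eq d n 0
  rw [hp0] at htr
  rw [hstates, htr]
  have hB := loopB d n 0 [] 0
  simp only [Nat.cast_zero] at hB
  rw [hB]
  simp
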